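-- pv_equiv track=rewrite | github.com/maverhas/QCMp2-FINAL | main.py | cotation2
-- ===== SOURCE A (Python) =====
-- def cotation2(list_of_answers):
--     #cotation à point négative :
--     # pré : nombre de réponse vrai (+1) et nombre de réponse fausse (-1)
--     # post : renvoie la cotation à point negative finale
--     i = 0
--     for answer in list_of_answers:
--         if answer == True:
--             i+=1
--         elif answer == False:
--             i-=1
--         elif answer == None:
--             i+=0
--     if i < 0:
--         i = 0
--     return i
-- ===== SOURCE B (Python) =====
-- def cotation2(list_of_answers):
--     # B: two counting scans and a clamp instead of an accumulating loop (simpler).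
--     p = list_of_answers.count(True)
--     m = list_of_answers.count(False)
--     return max(0, p - m)
-- ===== Notes on version B (the rewrite author's own statement) =====
-- stated objective: simpler
-- what changed: Replaced the accumulating elif-chain loop and post-clamp with two independent list.count scans and a closed-form max(0, p - m).
import Mathlib
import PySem

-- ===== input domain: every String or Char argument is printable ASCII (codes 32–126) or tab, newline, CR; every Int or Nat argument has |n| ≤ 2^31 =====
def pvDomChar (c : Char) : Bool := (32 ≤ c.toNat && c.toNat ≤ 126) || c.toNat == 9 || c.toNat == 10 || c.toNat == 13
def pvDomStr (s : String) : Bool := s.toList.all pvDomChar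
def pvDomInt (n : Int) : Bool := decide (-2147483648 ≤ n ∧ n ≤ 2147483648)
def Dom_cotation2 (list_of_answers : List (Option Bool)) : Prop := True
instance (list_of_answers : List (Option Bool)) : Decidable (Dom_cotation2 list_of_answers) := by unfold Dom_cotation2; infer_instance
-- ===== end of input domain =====

-- B replaces the accumulating elif-chain loop and post-clamp with two list.count
-- scans and max 0 (p - m) (objective: simpler).


-- ===== PORT A =====
-- loop accumulator i, then the final clamp 'if i < 0: i = 0'
def cotation2 (list_of_answers : List (Option Bool)) : Int :=
  let i := list_of_answers.foldl (fun i answer =>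
    if answer == some true then i + 1
    else if answer == some false then i - 1
    else if answer == none then i + 0
    else i) 0
  if i < 0 then 0 else i

-- ===== PORT B =====
def cotation2_alt (list_of_answers : List (Option Bool)) : Int :=
  let p : Int := PySem.List.count list_of_answers (some true)
  let m : Int := PySem.List.count list_of_answers (some false)
  max 0 (p - m)

-- ===== PRECONDITION & SPEC =====
def Spec_cotation2 (list_of_answers : List (Option Bool)) (out : Int) : Prop := out = cotation2_alt list_of_answers
instance (list_of_answers : List (Option Bool)) (out : Int) : Decidable (Spec_cotation2 list_of_answers out) := by unfold Spec_cotation2; infer_instance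

-- ===== CLAIM (what is proved, stated in full; the proofs are below) =====
def Claim_equal_cotation2 : Prop := ∀ (list_of_answers : List (Option Bool)), Dom_cotation2 list_of_answers → Spec_cotation2 list_of_answers (cotation2 list_of_answers)

-- ===== LEMMAS AND PROOFS =====

theorem cotation2_foldl_count (xs : List (Option Bool)) (i : Int) :
    xs.foldl (fun i answer =>
      if answer == some true then i + 1
      else if answer == some false then i - 1
      else if answer == none then i + 0
      else i) i
    = i + (PySem.List.count xs (some true) : Int) - (PySem.List.count xs (some false) : Int) := by
  induction xs generalizing i with
  | nil => simp [PySem.List.count]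
  | cons x xs ih =>
    rw [List.foldl_cons, ih]
    cases x with
    | none => simp [PySem.List.count, List.count_cons]
    | some b =>
      cases b <;> simp [PySem.List.count, List.count_cons] <;> push_cast <;> ring

-- ===== VERDICT (by name: the statement is the Claim_ definition above) =====
theorem cotation2_spec : Claim_equal_cotation2 := by
  intro xs _
  unfold Spec_cotation2 cotation2 cotation2_alt
  simp only [cotation2_foldl_count]
  omega
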